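-- pv_equiv track=rewrite | github.com/Howloong/Leetcode | python/leetcode/editor/cn/P2003_SmallestMissingGeneticValueInEachSubtree.py | smallestMissingValueSubtree
-- ===== SOURCE A (Python) =====
-- from typing import List
--
-- def smallestMissingValueSubtree(parents: List[int], nums: List[int]) -> List[int]:
--     n = len(parents)
--     ans = [1] * n
--     if 1 not in nums:
--         return ans
--     tree = [[] for _ in range(n)]
--     for i in range(1, n):
--         tree[parents[i]].append(i)
--     vis = set()
--
--     def dfs(x: int):
--         vis.add(nums[x])
--         for son in tree[x]:
--             if nums[son] not in vis:
--                 dfs(son)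
--
--     mex = 2
--     node = nums.index(1)
--     while node >= 0:
--         dfs(node)
--         while mex in vis:
--             mex += 1
--         ans[node] = mex
--         node = parents[node]
--     return ans
-- ===== SOURCE B (Python) =====
-- from typing import List
--
-- def smallestMissingValueSubtree(parents: List[int], nums: List[int]) -> List[int]:
--     n = len(parents)
--     if 1 not in nums:
--         return [1] * n
--     tree = [[] for _ in range(n)]
--     i = 1
--     for p in parents[1:]:
--         tree[p].append(i)
--         i += 1
--     chain = []
--     v = nums.index(1)
--     while v >= 0:
--         chain.append(v)
--         v = parents[v]
--     vis = set()
--     mex = 2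
--     updates = []
--     for v in chain:
--         vis.add(nums[v])
--         stack = tree[v][::-1]
--         while stack:
--             x = stack.pop()
--             if nums[x] not in vis:
--                 vis.add(nums[x])
--                 stack.extend(reversed(tree[x]))
--         while mex in vis:
--             mex += 1
--         updates.append((v, mex))
--     ans = [1] * n
--     for v, m in updates:
--         ans[v] = m
--     return ans
-- ===== Notes on version B (the rewrite author's own statement) =====
-- stated objective: alternative
-- what changed: B materialises the 1-node's ancestor chain first and folds over it, replaces the recursive dfs with an explicit-stack loop, builds the adjacency lists with a counter pass over parents[1:] instead of an index loop, and collects (node, mex) updates applied to the answer array at the end instead of writing in place.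
-- outside the precondition, e.g. on smallestMissingValueSubtree([-1], [1, 5]): A returns [2], B returns [2]
import Mathlib
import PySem

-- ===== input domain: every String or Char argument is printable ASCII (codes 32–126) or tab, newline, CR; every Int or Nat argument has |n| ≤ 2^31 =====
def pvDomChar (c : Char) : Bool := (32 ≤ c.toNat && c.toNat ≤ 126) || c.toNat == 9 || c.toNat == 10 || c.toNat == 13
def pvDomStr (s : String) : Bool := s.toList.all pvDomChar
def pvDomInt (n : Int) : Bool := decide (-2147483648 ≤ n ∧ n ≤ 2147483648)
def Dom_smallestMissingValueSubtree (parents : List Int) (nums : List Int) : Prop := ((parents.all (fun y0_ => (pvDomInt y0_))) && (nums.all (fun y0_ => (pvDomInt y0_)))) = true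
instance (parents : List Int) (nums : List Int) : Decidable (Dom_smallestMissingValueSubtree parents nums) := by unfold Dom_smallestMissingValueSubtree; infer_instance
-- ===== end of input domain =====

-- B restructures A: the ancestor chain of the 1-node is materialised first and folded over,
-- the recursive dfs becomes an explicit-stack loop, the adjacency lists are built by a
-- counter pass over parents[1:], and the answers are collected as (node, mex) updates
-- applied at the end; objective: alternative decomposition, same cost.

-- ===== PORT A =====
-- `tree = [[] for _ in range(n)]; for i in range(1, n): tree[parents[i]].append(i)`
def pvTreeA (parents : List Int) : List (List Int) :=
  (PySem.List.pyRange 1 (parents.length : Int) 1).foldl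
    (fun t i =>
      PySem.List.pySetD t (PySem.List.pyGetD parents i 0)
        (PySem.List.pyGetD t (PySem.List.pyGetD parents i 0) [] ++ [i]))
    (List.replicate parents.length [])

-- A's recursive `dfs`; the Nat fuel only makes the recursion total (nested calls are guarded
-- by a fresh value each, so depth ≤ #distinct values + 1 ≤ parents.length + 1 on Pre_ inputs).
def pvDfsA (tree : List (List Int)) (nums : List Int) : Nat → Int → PySem.Set Int → PySem.Set Int
  | 0, _, vis => vis
  | f + 1, x, vis =>
      (PySem.List.pyGetD tree x []).foldl
        (fun v son =>
          if PySem.Set.contains v (PySem.List.pyGetD nums son 0) then v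
          else pvDfsA tree nums f son v)
        (PySem.Set.add vis (PySem.List.pyGetD nums x 0))

-- `while mex in vis: mex += 1` (fuel |vis| + 1: each hit consumes a distinct member of vis)
def pvMexA : PySem.Set Int → Nat → Int → Int
  | _, 0, m => m
  | vis, f + 1, m => if PySem.Set.contains vis m then pvMexA vis f (m + 1) else m

-- `while node >= 0: dfs(node); …; node = parents[node]` (fuel n + 1: a terminating chain
-- visits distinct nodes, so it has at most n steps on Pre_ inputs)
def pvWhileA (parents nums : List Int) (tree : List (List Int)) :
    Nat → Int → Int → PySem.Set Int → List Int → List Int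
  | 0, _, _, _, ans => ans
  | f + 1, node, mex, vis, ans =>
      if 0 ≤ node then
        let vis' := pvDfsA tree nums (parents.length + 1) node vis
        let mex' := pvMexA vis' (vis'.length + 1) mex
        pvWhileA parents nums tree f (PySem.List.pyGetD parents node 0) mex' vis'
          (PySem.List.pySetD ans node mex')
      else ans

def smallestMissingValueSubtree (parents nums : List Int) : List Int :=
  let n := parents.length
  let ans := List.replicate n (1 : Int)
  if ¬ ((1 : Int) ∈ nums) then ans
  else
    pvWhileA parents nums (pvTreeA parents) (n + 1)
      (((PySem.List.index? nums 1).getD 0 : Nat) : Int) 2 PySem.Set.empty ans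

-- ===== PORT B =====
-- `i = 1; for p in parents[1:]: tree[p].append(i); i += 1`
def pvTreeB (parents : List Int) : List (List Int) :=
  ((PySem.List.slice parents (some 1) none).foldl
    (fun (s : List (List Int) × Int) p =>
      (PySem.List.pySetD s.1 p (PySem.List.pyGetD s.1 p [] ++ [s.2]), s.2 + 1))
    (List.replicate parents.length [], 1)).1

-- `chain = []; v = nums.index(1); while v >= 0: chain.append(v); v = parents[v]`
-- (fuel n + 1, exactly as A's outer while)
def pvChainB (parents : List Int) : Nat → Int → List Int
  | 0, _ => []
  | f + 1, v => if 0 ≤ v then v :: pvChainB parents f (PySem.List.pyGetD parents v 0) else []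

-- B's explicit stack.  Python pops from the END of `stack` and pushes `reversed(tree[x])`,
-- so the next pop is tree[x][0]: the list here keeps the stack TOP AT THE HEAD, which is
-- exactly that order.  The Nat fuel only makes the loop total (each step either drops one
-- entry or consumes a fresh value and pushes ≤ n entries, so (n+2)*(n+2) pops suffice).
def pvStkB (tree : List (List Int)) (nums : List Int) :
    Nat → List Int → PySem.Set Int → PySem.Set Int
  | 0, _, vis => vis
  | _ + 1, [], vis => vis
  | f + 1, x :: st, vis =>
      if PySem.Set.contains vis (PySem.List.pyGetD nums x 0) then pvStkB tree nums f st vis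
      else
        pvStkB tree nums f (PySem.List.pyGetD tree x [] ++ st)
          (PySem.Set.add vis (PySem.List.pyGetD nums x 0))

-- `while mex in vis: mex += 1` (same fuel rationale as A's)
def pvMexB : PySem.Set Int → Nat → Int → Int
  | _, 0, m => m
  | vis, f + 1, m => if PySem.Set.contains vis m then pvMexB vis f (m + 1) else m

-- body of `for v in chain:` — state is (vis, mex, updates)
def pvStepB (tree : List (List Int)) (nums : List Int) (F : Nat)
    (s : PySem.Set Int × Int × List (Int × Int)) (v : Int) :
    PySem.Set Int × Int × List (Int × Int) :=
  let vis1 := PySem.Set.add s.1 (PySem.List.pyGetD nums v 0)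
  let vis' := pvStkB tree nums F (PySem.List.pyGetD tree v []) vis1
  let mex' := pvMexB vis' (vis'.length + 1) s.2.1
  (vis', mex', s.2.2 ++ [(v, mex')])

def smallestMissingValueSubtree_alt (parents nums : List Int) : List Int :=
  let n := parents.length
  if ¬ ((1 : Int) ∈ nums) then List.replicate n (1 : Int)
  else
    let tree := pvTreeB parents
    let chain := pvChainB parents (n + 1) (((PySem.List.index? nums 1).getD 0 : Nat) : Int)
    let r := chain.foldl (pvStepB tree nums ((n + 2) * (n + 2))) (PySem.Set.empty, 2, [])
    r.2.2.foldl (fun a vm => PySem.List.pySetD a vm.1 vm.2) (List.replicate n (1 : Int))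

-- ===== PRECONDITION & SPEC =====
-- k-th ancestor of a node under the parents array (a structural notion of the input
-- encoding — ancestor k+1 is parents[ancestor k] while that is a real node)
def pvKthAncestor (parents : List Int) : Nat → Int → Int
  | 0, v => v
  | k + 1, v => if 0 ≤ v then pvKthAncestor parents k (PySem.List.pyGetD parents v 0) else v

-- When 1 occurs in nums (otherwise A returns [1]*n before touching parents), Pre_ keeps the
-- function's natural domain: equal-length arrays, every non-root parents[i] a resolvable
-- Python list index (else the tree build raises IndexError), and an ancestor chain of the
-- 1-node that stays in range and reaches a negative parent (else A raises IndexError in dfs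
-- or its while loop never terminates).  It also excludes length-mismatched inputs on which
-- A happens to return: indexing one array with the other's length is accidental.
def Pre_smallestMissingValueSubtree (parents : List Int) (nums : List Int) : Prop :=
  (1 : Int) ∈ nums →
    (nums.length = parents.length ∧
      (∀ i : Nat, 1 ≤ i → i < parents.length →
        -(parents.length : Int) ≤ parents.getD i 0 ∧ parents.getD i 0 < (parents.length : Int)) ∧
      (∃ k : Nat, k < parents.length + 1 ∧
        pvKthAncestor parents k (((PySem.List.index? nums 1).getD 0 : Nat) : Int) < 0 ∧
        ∀ j : Nat, j < k →
          0 ≤ pvKthAncestor parents j (((PySem.List.index? nums 1).getD 0 : Nat) : Int) ∧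
          pvKthAncestor parents j (((PySem.List.index? nums 1).getD 0 : Nat) : Int) < (parents.length : Int)))
instance (parents : List Int) (nums : List Int) : Decidable (Pre_smallestMissingValueSubtree parents nums) := by
  unfold Pre_smallestMissingValueSubtree; infer_instance

def pvWitness_smallestMissingValueSubtree : List Int × List Int := ([-1, 0, 0], [1, 2, 3])

def Spec_smallestMissingValueSubtree (parents : List Int) (nums : List Int) (out : List Int) : Prop := out = smallestMissingValueSubtree_alt parents nums
instance (parents : List Int) (nums : List Int) (out : List Int) : Decidable (Spec_smallestMissingValueSubtree parents nums out) := by unfold Spec_smallestMissingValueSubtree; infer_instance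

-- ===== CLAIM (what is proved, stated in full; the proofs are below) =====
def Claim_equal_smallestMissingValueSubtree : Prop := ∀ (parents : List Int) (nums : List Int), Dom_smallestMissingValueSubtree parents nums → Pre_smallestMissingValueSubtree parents nums → Spec_smallestMissingValueSubtree parents nums (smallestMissingValueSubtree parents nums)

-- ===== LEMMAS AND PROOFS =====
def pvMu (nums : List Int) (v : PySem.Set Int) : Nat :=
  (nums.filter (fun a => !PySem.Set.contains v a)).length
def pvTreeOK (n : Nat) (t : List (List Int)) : Prop :=
  ∀ l ∈ t, l.length ≤ n ∧ ∀ s ∈ l, 1 ≤ s ∧ s < (n : Int)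

theorem pvDfsA_mono (tree : List (List Int)) (nums : List Int) :
    ∀ (f : Nat) (x : Int) (v : PySem.Set Int) (a : Int), a ∈ v → a ∈ pvDfsA tree nums f x v := by
  intro f
  induction f with
  | zero => intro x v a h; exact h
  | succ g ih =>
    intro x v a h
    show a ∈ (PySem.List.pyGetD tree x []).foldl _ _
    have aux : ∀ (l : List Int) (acc : PySem.Set Int), a ∈ acc →
        a ∈ l.foldl (fun w son =>
            if PySem.Set.contains w (PySem.List.pyGetD nums son 0) then w
            else pvDfsA tree nums g son w) acc := by
      intro l
      induction l with
      | nil => intro acc h; exact h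
      | cons s l' ihl =>
        intro acc hacc
        simp only [List.foldl_cons]
        by_cases hc : PySem.Set.contains acc (PySem.List.pyGetD nums s 0)
        · rw [if_pos hc]; exact ihl acc hacc
        · rw [if_neg hc]; exact ihl _ (ih s acc a hacc)
    exact aux _ _ ((PySem.Set.mem_add v _ a).mpr (Or.inl h))

theorem pvMu_mono (nums : List Int) {v w : PySem.Set Int}
    (h : ∀ a : Int, a ∈ v → a ∈ w) : pvMu nums w ≤ pvMu nums v := by
  apply List.Sublist.length_le
  apply List.monotone_filter_right
  intro a ha
  simp only [Bool.not_eq_true', ← Bool.not_eq_true, PySem.Set.contains_iff] at ha ⊢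
  exact fun hv => ha (h a hv)

theorem pvMu_pos (nums : List Int) (v : PySem.Set Int) {b : Int}
    (hb : b ∈ nums) (hv : b ∉ v) : 1 ≤ pvMu nums v := by
  have : b ∈ nums.filter (fun a => !PySem.Set.contains v a) := by
    simp [List.mem_filter, hb, hv]
  unfold pvMu
  exact List.length_pos_of_mem this

theorem pvMu_add_lt (nums : List Int) (v : PySem.Set Int) {b : Int}
    (hb : b ∈ nums) (hv : b ∉ v) : pvMu nums (PySem.Set.add v b) < pvMu nums v := by
  have hsub : (nums.filter (fun a => !PySem.Set.contains (PySem.Set.add v b) a)).Sublist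
      (nums.filter (fun a => !PySem.Set.contains v a)) := by
    apply List.monotone_filter_right
    intro a ha
    simp only [Bool.not_eq_true', ← Bool.not_eq_true, PySem.Set.contains_iff] at ha ⊢
    exact fun hva => ha ((PySem.Set.mem_add v b a).mpr (Or.inl hva))
  have hb1 : b ∈ nums.filter (fun a => !PySem.Set.contains v a) := by
    simp [List.mem_filter, hb, hv]
  have hb2 : b ∉ nums.filter (fun a => !PySem.Set.contains (PySem.Set.add v b) a) := by
    simp [List.mem_filter]
  have hne : nums.filter (fun a => !PySem.Set.contains (PySem.Set.add v b) a)
      ≠ nums.filter (fun a => !PySem.Set.contains v a) := by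
    intro h; rw [h] at hb2; exact hb2 hb1
  exact Nat.lt_of_le_of_ne hsub.length_le (fun h => hne (hsub.eq_of_length h))

theorem pvNum_mem {nums : List Int} {y : Int} (h0 : 0 ≤ y) (h1 : y < (nums.length : Int)) :
    PySem.List.pyGetD nums y 0 ∈ nums := by
  have h := PySem.List.pyGet?_eq_some_getElem (xs := nums) (i := y) h0 (by omega)
  unfold PySem.List.pyGetD
  rw [h]
  exact List.getElem_mem _

theorem pvGetD_mem_or {α : Type} (xs : List α) (i : Int) (d : α) :
    PySem.List.pyGetD xs i d ∈ xs ∨ PySem.List.pyGetD xs i d = d := by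
  unfold PySem.List.pyGetD PySem.List.pyGet?
  cases hk : PySem.List.pyIdx? xs.length i with
  | none => simp
  | some k =>
    simp only [Option.bind_some]
    cases hx : xs[k]? with
    | none => simp
    | some a => simp [List.mem_of_getElem? hx]

-- sons of any lookup satisfy the invariant
theorem pvSons_ok {n : Nat} {tree : List (List Int)} (htree : pvTreeOK n tree) (x : Int) :
    (PySem.List.pyGetD tree x []).length ≤ n ∧
      ∀ s ∈ PySem.List.pyGetD tree x [], 1 ≤ s ∧ s < (n : Int) := by
  rcases pvGetD_mem_or tree x [] with h | h
  · exact htree _ h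
  · rw [h]; exact ⟨by simp, by simp⟩

theorem pvDfsA_fuel {n : Nat} {tree : List (List Int)} {nums : List Int}
    (htree : pvTreeOK n tree) (hn : nums.length = n) :
    ∀ (f₁ f₂ : Nat) (x : Int) (v : PySem.Set Int),
      PySem.List.pyGetD nums x 0 ∈ nums → PySem.List.pyGetD nums x 0 ∉ v →
      pvMu nums v ≤ f₁ → pvMu nums v ≤ f₂ →
      pvDfsA tree nums f₁ x v = pvDfsA tree nums f₂ x v := by
  intro f₁
  induction f₁ with
  | zero =>
    intro f₂ x v hmem hnot h1 _
    exact absurd h1 (by have := pvMu_pos nums v hmem hnot; omega)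
  | succ g ih =>
    intro f₂ x v hmem hnot h1 h2
    obtain ⟨h, rfl⟩ : ∃ h, f₂ = h + 1 := by
      cases f₂ with
      | zero => exact absurd h2 (by have := pvMu_pos nums v hmem hnot; omega)
      | succ h => exact ⟨h, rfl⟩
    show (PySem.List.pyGetD tree x []).foldl _ _ = (PySem.List.pyGetD tree x []).foldl _ _
    have hmu' : pvMu nums (PySem.Set.add v (PySem.List.pyGetD nums x 0)) < pvMu nums v :=
      pvMu_add_lt nums v hmem hnot
    have hsons := (pvSons_ok htree x).2
    have aux : ∀ (l : List Int), (∀ s ∈ l, 1 ≤ s ∧ s < (n : Int)) →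
        ∀ (acc : PySem.Set Int), pvMu nums acc ≤ g → pvMu nums acc ≤ h →
        l.foldl (fun w son =>
            if PySem.Set.contains w (PySem.List.pyGetD nums son 0) then w
            else pvDfsA tree nums g son w) acc
          = l.foldl (fun w son =>
            if PySem.Set.contains w (PySem.List.pyGetD nums son 0) then w
            else pvDfsA tree nums h son w) acc := by
      intro l
      induction l with
      | nil => intro _ acc _ _; rfl
      | cons s l' ihl =>
        intro hl acc hg hh
        simp only [List.foldl_cons]
        by_cases hc : PySem.Set.contains acc (PySem.List.pyGetD nums s 0)
        · rw [if_pos hc, if_pos hc]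
          exact ihl (fun z hz => hl z (by simp [hz])) acc hg hh
        · rw [if_neg hc, if_neg hc]
          have hs := hl s (by simp)
          have hsm : PySem.List.pyGetD nums s 0 ∈ nums :=
            pvNum_mem (by omega) (by rw [hn]; omega)
          have hsnot : PySem.List.pyGetD nums s 0 ∉ acc :=
            fun hm => hc ((PySem.Set.contains_iff acc _).mpr hm)
          have heq : pvDfsA tree nums g s acc = pvDfsA tree nums h s acc :=
            ih h s acc hsm hsnot hg hh
          rw [heq]
          apply ihl (fun z hz => hl z (by simp [hz]))
          · exact le_trans (pvMu_mono nums (fun a ha => pvDfsA_mono tree nums h s acc a ha)) hg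
          · exact le_trans (pvMu_mono nums (fun a ha => pvDfsA_mono tree nums h s acc a ha)) hh
    exact aux _ hsons _ (by omega) (by omega)

theorem pvFoldDfs_fuel {n : Nat} {tree : List (List Int)} {nums : List Int}
    (htree : pvTreeOK n tree) (hn : nums.length = n) :
    ∀ (l : List Int), (∀ s ∈ l, 1 ≤ s ∧ s < (n : Int)) →
      ∀ (acc : PySem.Set Int) (g h : Nat), pvMu nums acc ≤ g → pvMu nums acc ≤ h →
        l.foldl (fun w s => if PySem.Set.contains w (PySem.List.pyGetD nums s 0) then w
                            else pvDfsA tree nums g s w) acc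
          = l.foldl (fun w s => if PySem.Set.contains w (PySem.List.pyGetD nums s 0) then w
                            else pvDfsA tree nums h s w) acc := by
  intro l
  induction l with
  | nil => intro _ acc g h _ _; rfl
  | cons s l' ihl =>
    intro hl acc g h hg hh
    simp only [List.foldl_cons]
    by_cases hc : PySem.Set.contains acc (PySem.List.pyGetD nums s 0)
    · rw [if_pos hc, if_pos hc]
      exact ihl (fun z hz => hl z (by simp [hz])) acc g h hg hh
    · rw [if_neg hc, if_neg hc]
      have hs := hl s (by simp)
      have hsm : PySem.List.pyGetD nums s 0 ∈ nums :=
        pvNum_mem (by omega) (by rw [hn]; omega)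
      have hsnot : PySem.List.pyGetD nums s 0 ∉ acc :=
        fun hm => hc ((PySem.Set.contains_iff acc _).mpr hm)
      have heq : pvDfsA tree nums g s acc = pvDfsA tree nums h s acc :=
        pvDfsA_fuel htree hn g h s acc hsm hsnot hg hh
      rw [heq]
      apply ihl (fun z hz => hl z (by simp [hz]))
      · exact le_trans (pvMu_mono nums (fun a ha => pvDfsA_mono tree nums h s acc a ha)) hg
      · exact le_trans (pvMu_mono nums (fun a ha => pvDfsA_mono tree nums h s acc a ha)) hh

theorem pvStkB_nil (tree : List (List Int)) (nums : List Int) :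
    ∀ (f : Nat) (v : PySem.Set Int), pvStkB tree nums f [] v = v := by
  intro f v; cases f <;> rfl

theorem pvStk_eq {n : Nat} {tree : List (List Int)} {nums : List Int}
    (htree : pvTreeOK n tree) (hn : nums.length = n) (hpos : 1 ≤ n) :
    ∀ (F : Nat) (st : List Int) (v : PySem.Set Int), (∀ y ∈ st, 1 ≤ y ∧ y < (n : Int)) →
      pvMu nums v * (n + 1) + st.length < F →
      pvStkB tree nums F st v
        = st.foldl (fun w y => if PySem.Set.contains w (PySem.List.pyGetD nums y 0) then w
                               else pvDfsA tree nums n y w) v := by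
  intro F
  induction F with
  | zero => intro st v _ hF; exact absurd hF (by omega)
  | succ F ih =>
    intro st v hst hF
    cases st with
    | nil => rw [pvStkB_nil]; rfl
    | cons y st' =>
      have hy := hst y (by simp)
      show (if PySem.Set.contains v (PySem.List.pyGetD nums y 0) then _ else _) = _
      simp only [List.foldl_cons]
      by_cases hc : PySem.Set.contains v (PySem.List.pyGetD nums y 0)
      · rw [if_pos hc, if_pos hc]
        exact ih st' v (fun z hz => hst z (by simp [hz])) (by simp at hF ⊢; omega)
      · rw [if_neg hc, if_neg hc]
        have hym : PySem.List.pyGetD nums y 0 ∈ nums :=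
          pvNum_mem (by omega) (by rw [hn]; omega)
        have hynot : PySem.List.pyGetD nums y 0 ∉ v :=
          fun hm => hc ((PySem.Set.contains_iff v _).mpr hm)
        set v' := PySem.Set.add v (PySem.List.pyGetD nums y 0) with hv'
        have hmu' : pvMu nums v' < pvMu nums v := pvMu_add_lt nums v hym hynot
        have hsons := pvSons_ok htree y
        have hvalid : ∀ z ∈ PySem.List.pyGetD tree y [] ++ st', 1 ≤ z ∧ z < (n : Int) := by
          intro z hz
          rcases List.mem_append.mp hz with h | h
          · exact hsons.2 z h
          · exact hst z (by simp [h])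
        have hbound : pvMu nums v' * (n + 1) + (PySem.List.pyGetD tree y [] ++ st').length < F := by
          have h1 : pvMu nums v' + 1 ≤ pvMu nums v := hmu'
          have h2 : (pvMu nums v' + 1) * (n + 1) ≤ pvMu nums v * (n + 1) :=
            Nat.mul_le_mul_right _ h1
          have h3 := hsons.1
          simp only [List.length_append, List.length_cons] at hF ⊢
          nlinarith
        rw [ih _ _ hvalid hbound, List.foldl_append]
        congr 1
        obtain ⟨m, hm⟩ : ∃ m, n = m + 1 := ⟨n - 1, by omega⟩
        have hdef : pvDfsA tree nums n y v
            = (PySem.List.pyGetD tree y []).foldl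
                (fun w s => if PySem.Set.contains w (PySem.List.pyGetD nums s 0) then w
                            else pvDfsA tree nums m s w) v' := by
          rw [hm]; rfl
        rw [hdef]
        have hmu'' : pvMu nums v' ≤ m := by
          have hle : pvMu nums v ≤ nums.length := List.length_filter_le _ _
          omega
        exact (pvFoldDfs_fuel htree hn _ hsons.2 v' m n hmu'' (by omega)).symm

theorem pvStep_eq {n : Nat} {tree : List (List Int)} {nums : List Int}
    (htree : pvTreeOK n tree) (htlen : tree.length = n) (hn : nums.length = n) (hpos : 1 ≤ n) :
    ∀ (node : Int) (vis : PySem.Set Int), 0 ≤ node →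
      pvDfsA tree nums (n + 1) node vis
        = pvStkB tree nums ((n + 2) * (n + 2)) (PySem.List.pyGetD tree node [])
            (PySem.Set.add vis (PySem.List.pyGetD nums node 0)) := by
  intro node vis h0
  by_cases hlt : node < (n : Int)
  · have hdef : pvDfsA tree nums (n + 1) node vis
        = (PySem.List.pyGetD tree node []).foldl
            (fun w s => if PySem.Set.contains w (PySem.List.pyGetD nums s 0) then w
                        else pvDfsA tree nums n s w)
            (PySem.Set.add vis (PySem.List.pyGetD nums node 0)) := rfl
    rw [hdef]
    have hsons := pvSons_ok htree node
    have hbound : pvMu nums (PySem.Set.add vis (PySem.List.pyGetD nums node 0)) * (n + 1)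
        + (PySem.List.pyGetD tree node []).length < (n + 2) * (n + 2) := by
      have h1 : pvMu nums (PySem.Set.add vis (PySem.List.pyGetD nums node 0)) ≤ n := by
        have := List.length_filter_le (fun a => !PySem.Set.contains
          (PySem.Set.add vis (PySem.List.pyGetD nums node 0)) a) nums
        unfold pvMu; omega
      have h2 := hsons.1
      nlinarith
    exact (pvStk_eq htree hn hpos _ _ _ hsons.2 hbound).symm
  · have hnil : PySem.List.pyGetD tree node [] = [] := by
      have hnone : PySem.List.pyGet? tree node = none := by
        rw [PySem.List.pyGet?_eq_none_iff]
        intro hc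
        rw [htlen] at hc
        obtain ⟨-, hc2⟩ := hc
        omega
      unfold PySem.List.pyGetD
      rw [hnone]; rfl
    have hdef : pvDfsA tree nums (n + 1) node vis
        = (PySem.List.pyGetD tree node []).foldl
            (fun w s => if PySem.Set.contains w (PySem.List.pyGetD nums s 0) then w
                        else pvDfsA tree nums n s w)
            (PySem.Set.add vis (PySem.List.pyGetD nums node 0)) := rfl
    rw [hdef, hnil, pvStkB_nil]
    rfl

theorem pvMex_eq : ∀ (vis : PySem.Set Int) (f : Nat) (m : Int), pvMexA vis f m = pvMexB vis f m := by
  intro vis f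
  induction f with
  | zero => intro m; rfl
  | succ g ih =>
    intro m
    show (if vis.contains m then pvMexA vis g (m + 1) else m)
        = (if vis.contains m then pvMexB vis g (m + 1) else m)
    rw [ih]

theorem pvFoldB_acc (tree : List (List Int)) (nums : List Int) (F : Nat) :
    ∀ (chain : List Int) (v : PySem.Set Int) (m : Int) (acc : List (Int × Int)),
      chain.foldl (pvStepB tree nums F) (v, m, acc)
        = ((chain.foldl (pvStepB tree nums F) (v, m, [])).1,
           (chain.foldl (pvStepB tree nums F) (v, m, [])).2.1,
           acc ++ (chain.foldl (pvStepB tree nums F) (v, m, [])).2.2) := by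
  intro chain
  induction chain with
  | nil => intro v m acc; simp
  | cons c rest ih =>
    intro v m acc
    simp only [List.foldl_cons]
    set s0 := pvStepB tree nums F (v, m, []) c with hs0
    have h1 : pvStepB tree nums F (v, m, acc) c = (s0.1, s0.2.1, acc ++ s0.2.2) := rfl
    have h2 : s0 = (s0.1, s0.2.1, s0.2.2) := rfl
    rw [h1, h2, ih s0.1 s0.2.1 (acc ++ s0.2.2), ih s0.1 s0.2.1 s0.2.2]
    simp

theorem pvWhile_eq {parents nums : List Int} {tree : List (List Int)}
    (htree : pvTreeOK parents.length tree) (htlen : tree.length = parents.length)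
    (hn : nums.length = parents.length) (hpos : 1 ≤ parents.length) :
    ∀ (f : Nat) (node mex : Int) (vis : PySem.Set Int) (ans : List Int),
      pvWhileA parents nums tree f node mex vis ans
        = ((pvChainB parents f node).foldl
              (pvStepB tree nums ((parents.length + 2) * (parents.length + 2)))
              (vis, mex, [])).2.2.foldl
            (fun a vm => PySem.List.pySetD a vm.1 vm.2) ans := by
  intro f
  induction f with
  | zero => intro node mex vis ans; rfl
  | succ f ih =>
    intro node mex vis ans
    by_cases h0 : 0 ≤ node
    · have hA : pvWhileA parents nums tree (f + 1) node mex vis ans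
          = pvWhileA parents nums tree f (PySem.List.pyGetD parents node 0)
              (pvMexA (pvDfsA tree nums (parents.length + 1) node vis)
                ((pvDfsA tree nums (parents.length + 1) node vis).length + 1) mex)
              (pvDfsA tree nums (parents.length + 1) node vis)
              (PySem.List.pySetD ans node
                (pvMexA (pvDfsA tree nums (parents.length + 1) node vis)
                  ((pvDfsA tree nums (parents.length + 1) node vis).length + 1) mex)) := by
        show (if 0 ≤ node then _ else _) = _
        rw [if_pos h0]
      have hC : pvChainB parents (f + 1) node
          = node :: pvChainB parents f (PySem.List.pyGetD parents node 0) := by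
        show (if 0 ≤ node then _ else _) = _
        rw [if_pos h0]
      set visB := pvStkB tree nums ((parents.length + 2) * (parents.length + 2))
          (PySem.List.pyGetD tree node [])
          (PySem.Set.add vis (PySem.List.pyGetD nums node 0)) with hvisB
      have hvis : pvDfsA tree nums (parents.length + 1) node vis = visB :=
        pvStep_eq htree htlen hn hpos node vis h0
      set mexB := pvMexB visB (visB.length + 1) mex with hmexB
      have hstep : pvStepB tree nums ((parents.length + 2) * (parents.length + 2))
          (vis, mex, []) node = (visB, mexB, [(node, mexB)]) := rfl
      rw [hA, hC]
      simp only [List.foldl_cons, hstep]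
      rw [pvFoldB_acc tree nums _ _ visB mexB [(node, mexB)]]
      simp only [List.singleton_append]
      rw [List.foldl_cons]
      rw [ih]
      rw [hvis, pvMex_eq]
    · have hA : pvWhileA parents nums tree (f + 1) node mex vis ans = ans := by
        show (if 0 ≤ node then _ else _) = _
        rw [if_neg h0]
      have hC : pvChainB parents (f + 1) node = [] := by
        show (if 0 ≤ node then _ else _) = _
        rw [if_neg h0]
      rw [hA, hC]
      rfl

-- ---- the two tree builds ----

theorem pvBuildAux (parents : List Int) :
    ∀ (l : List Int) (k : Nat) (t : List (List Int)), parents.drop k = l →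
      (PySem.List.pyRange (k : Int) (parents.length : Int) 1).foldl
        (fun t i =>
          PySem.List.pySetD t (PySem.List.pyGetD parents i 0)
            (PySem.List.pyGetD t (PySem.List.pyGetD parents i 0) [] ++ [i])) t
        = (l.foldl
            (fun (s : List (List Int) × Int) p =>
              (PySem.List.pySetD s.1 p (PySem.List.pyGetD s.1 p [] ++ [s.2]), s.2 + 1))
            (t, (k : Int))).1 := by
  intro l
  induction l with
  | nil =>
    intro k t hk
    have hlen : parents.length ≤ k := by
      by_contra hc
      have := List.drop_eq_nil_iff.mp hk
      omega
    rw [PySem.List.pyRange_one_eq_nil (by exact_mod_cast hlen)]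
    rfl
  | cons p l' ihl =>
    intro k t hk
    have hklt : k < parents.length := by
      by_contra hc
      rw [List.drop_eq_nil_iff.mpr (by omega)] at hk
      simp at hk
    have hget : parents[k]? = some p := by
      have h0 : (parents.drop k)[0]? = some p := by rw [hk]; rfl
      rw [List.getElem?_drop] at h0
      simpa using h0
    have hgetD : PySem.List.pyGetD parents (k : Int) 0 = p := by
      rw [PySem.List.pyGetD_natCast]
      simp [List.getD_eq_getElem?_getD, hget]
    have hdrop : parents.drop (k + 1) = l' := by
      have : parents.drop (k + 1) = (parents.drop k).drop 1 := by
        rw [List.drop_drop]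
      rw [this, hk]
      rfl
    rw [PySem.List.pyRange_one_cons (by exact_mod_cast hklt), List.foldl_cons, List.foldl_cons]
    rw [hgetD]
    have hcast : ((k : Int) + 1) = ((k + 1 : Nat) : Int) := by push_cast; ring
    rw [hcast, ihl (k + 1) _ hdrop]

theorem pvTree_eq (parents : List Int) : pvTreeB parents = pvTreeA parents := by
  unfold pvTreeB pvTreeA
  have hsl : PySem.List.slice parents (some 1) none = parents.drop 1 := by
    rw [PySem.List.slice_from]; · rfl
    · norm_num
  rw [hsl]
  have := pvBuildAux parents (parents.drop 1) 1 (List.replicate parents.length []) rfl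
  rw [show ((1 : Nat) : Int) = (1 : Int) by norm_num] at this
  rw [this]

theorem pvSetD_mem {α : Type} {xs : List α} {i : Int} {v l : α}
    (h : l ∈ PySem.List.pySetD xs i v) : l = v ∨ l ∈ xs := by
  unfold PySem.List.pySetD PySem.List.pySet? at h
  cases hk : PySem.List.pyIdx? xs.length i with
  | none => rw [hk] at h; simp at h; exact Or.inr h
  | some k =>
    rw [hk] at h; simp at h
    rcases List.mem_or_eq_of_mem_set h with h' | h'
    · exact Or.inr h'
    · exact Or.inl h'

-- prefix of A's build loop (proof-side)
def pvBP (parents : List Int) (k : Nat) : List (List Int) :=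
  (PySem.List.pyRange 1 (k : Int) 1).foldl
    (fun t i =>
      PySem.List.pySetD t (PySem.List.pyGetD parents i 0)
        (PySem.List.pyGetD t (PySem.List.pyGetD parents i 0) [] ++ [i]))
    (List.replicate parents.length [])

theorem pvBP_succ (parents : List Int) (k : Nat) (hk : 1 ≤ k) :
    pvBP parents (k + 1)
      = PySem.List.pySetD (pvBP parents k) (PySem.List.pyGetD parents (k : Int) 0)
          (PySem.List.pyGetD (pvBP parents k) (PySem.List.pyGetD parents (k : Int) 0) []
            ++ [(k : Int)]) := by
  unfold pvBP
  rw [show ((k + 1 : Nat) : Int) = (k : Int) + 1 by push_cast; ring,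
      PySem.List.pyRange_one_succ_right (by exact_mod_cast hk), List.foldl_append]
  rfl

theorem pvBP_inv (parents : List Int) :
    ∀ k : Nat,
      (pvBP parents k).length = parents.length ∧
      ∀ l ∈ pvBP parents k, l.length ≤ k ∧ ∀ s ∈ l, 1 ≤ s ∧ s < (k : Int) := by
  intro k
  induction k with
  | zero =>
    constructor
    · unfold pvBP
      rw [PySem.List.pyRange_one_eq_nil (by norm_num)]
      simp
    · intro l hl
      unfold pvBP at hl
      rw [PySem.List.pyRange_one_eq_nil (by norm_num)] at hl
      simp only [List.foldl_nil] at hl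
      have : l = [] := List.eq_of_mem_replicate hl
      subst this
      exact ⟨by simp, by simp⟩
  | succ k ih =>
    by_cases hk : 1 ≤ k
    · rw [pvBP_succ parents k hk]
      obtain ⟨ihlen, ihmem⟩ := ih
      refine ⟨by rw [PySem.List.length_pySetD]; exact ihlen, ?_⟩
      intro l hl
      rcases pvSetD_mem hl with hnew | hold
      · subst hnew
        rcases pvGetD_mem_or (pvBP parents k) (PySem.List.pyGetD parents (k : Int) 0) []
          with hmem | hdef
        · obtain ⟨hlen, hels⟩ := ihmem _ hmem
          refine ⟨by simp only [List.length_append, List.length_singleton]; omega, ?_⟩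
          intro s hs
          rcases List.mem_append.mp hs with h | h
          · have := hels s h
            constructor
            · omega
            · push_cast; omega
          · simp at h
            subst h
            constructor
            · exact_mod_cast hk
            · push_cast; omega
        · rw [hdef]
          refine ⟨by simp, ?_⟩
          intro s hs
          simp at hs
          subst hs
          constructor
          · exact_mod_cast hk
          · push_cast; omega
      · obtain ⟨hlen, hels⟩ := ihmem _ hold
        refine ⟨by omega, ?_⟩
        intro s hs
        have := hels s hs
        constructor
        · omega
        · push_cast; omega
    · have hk0 : k = 0 := by omega
      subst hk0
      have h01 : pvBP parents 1 = pvBP parents 0 := by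
        unfold pvBP
        rw [PySem.List.pyRange_one_eq_nil (by norm_num), PySem.List.pyRange_one_eq_nil (by norm_num)]
      rw [h01]
      obtain ⟨ihlen, ihmem⟩ := ih
      refine ⟨ihlen, ?_⟩
      intro l hl
      obtain ⟨hlen, hels⟩ := ihmem l hl
      refine ⟨by omega, ?_⟩
      intro s hs
      have := hels s hs
      constructor
      · omega
      · push_cast; omega

theorem pvTreeA_ok (parents : List Int) :
    pvTreeOK parents.length (pvTreeA parents) ∧ (pvTreeA parents).length = parents.length := by
  have h := pvBP_inv parents parents.length
  have hdef : pvTreeA parents = pvBP parents parents.length := rfl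
  rw [hdef]
  exact ⟨fun l hl => h.2 l hl, h.1⟩

-- ===== VERDICT (by name: the statement is the Claim_ definition above) =====
theorem smallestMissingValueSubtree_spec : Claim_equal_smallestMissingValueSubtree := by
  intro parents nums _ hpre
  unfold Spec_smallestMissingValueSubtree
  unfold smallestMissingValueSubtree smallestMissingValueSubtree_alt
  by_cases h1 : (1 : Int) ∈ nums
  · obtain ⟨hn, -, -⟩ := hpre h1
    obtain ⟨hok, hlen⟩ := pvTreeA_ok parents
    have hpos : 1 ≤ parents.length := by
      have : nums ≠ [] := by intro h; subst h; simp at h1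
      have : 0 < nums.length := List.length_pos_of_ne_nil this
      omega
    simp only [if_neg (show ¬ (1 : Int) ∉ nums from fun h => h h1)]
    rw [pvTree_eq]
    exact pvWhile_eq hok hlen hn hpos _ _ _ _ _
  · simp only [if_pos h1]
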